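-- pv_equiv track=rewrite | github.com/CompassMentis/PyViPr | part.py | break_lines_into_slides
-- ===== SOURCE A (Python) =====
-- def break_lines_into_slides(lines):
--     """
--     Each slide starts with a line starting with [slide:
--
--     returns a list of list of lines - with each list of lines defining one slide
--     """
--     result = []
--     slide_lines = []
--
--     for line in lines:
--         line = line.rstrip()
--         if line.startswith('[slide'):
--             if slide_lines:
--                 result.append(slide_lines)
--             slide_lines = []
--         slide_lines.append(line)
--
--     if slide_lines:
--         result.append(slide_lines)
--
--     return result
-- ===== SOURCE B (Python) =====
-- def break_lines_into_slides(lines):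
--     """Build the slides back-to-front: walk the lines in reverse, collecting each
--     (rstripped) line into the current group; a marker line seals its group.
--     Groups and the slide list are collected reversed and flipped once at the end."""
--     slides = []
--     group = []  # current group, lines in reverse order
--     for line in reversed(lines):
--         stripped = line.rstrip()
--         group.append(stripped)
--         if stripped.startswith('[slide'):
--             group.reverse()
--             slides.append(group)
--             group = []
--     if group:
--         group.reverse()
--         slides.append(group)
--     slides.reverse()
--     return slides
-- ===== Notes on version B (the rewrite author's own statement) =====
-- stated objective: alternative
-- what changed: B traverses the lines in reverse and builds the slide list back-to-front, prepending each line to an open leading group and sealing the group when it sees its marker line, instead of A's forward accumulate-and-flush loop.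
import Mathlib
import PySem

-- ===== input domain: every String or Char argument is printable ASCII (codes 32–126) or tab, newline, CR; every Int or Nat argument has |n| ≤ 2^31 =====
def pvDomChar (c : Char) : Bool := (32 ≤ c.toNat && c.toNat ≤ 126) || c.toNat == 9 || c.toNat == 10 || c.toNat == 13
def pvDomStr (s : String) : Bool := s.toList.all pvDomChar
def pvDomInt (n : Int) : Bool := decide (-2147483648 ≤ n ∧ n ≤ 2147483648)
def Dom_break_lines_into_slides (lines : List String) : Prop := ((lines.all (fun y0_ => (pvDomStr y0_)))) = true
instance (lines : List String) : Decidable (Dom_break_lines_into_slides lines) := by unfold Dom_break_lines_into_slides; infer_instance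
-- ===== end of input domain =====

-- B builds the slide list back-to-front (reverse traversal, prepend, seal on marker)
-- instead of A's forward accumulate-and-flush loop; same cost, different traversal.

-- ===== PORT A =====
def break_lines_into_slides (lines : List String) : List (List String) :=
  let st := lines.foldl
    (fun (st : List (List String) × List String) line =>
      let line := PySem.Str.rstrip line
      let st := if PySem.Str.startswith line "[slide" then
          ((if st.2 ≠ [] then st.1 ++ [st.2] else st.1), ([] : List String))
        else st
      (st.1, st.2 ++ [line]))
    ([], [])
  if st.2 ≠ [] then st.1 ++ [st.2] else st.1

-- ===== PORT B =====
-- 'for line in reversed(lines)' is ported as a foldl over lines.reverse;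
-- list.append x = ++ [x], list.reverse() = .reverse
def break_lines_into_slides_alt (lines : List String) : List (List String) :=
  let st := lines.reverse.foldl
    (fun (st : List (List String) × List String) line =>
      let stripped := PySem.Str.rstrip line
      let group := st.2 ++ [stripped]
      if PySem.Str.startswith stripped "[slide" then (st.1 ++ [group.reverse], ([] : List String))
      else (st.1, group))
    ([], [])
  let slides := if st.2 ≠ [] then st.1 ++ [st.2.reverse] else st.1
  slides.reverse

-- ===== PRECONDITION & SPEC =====
def Spec_break_lines_into_slides (lines : List String) (out : List (List String)) : Prop := out = break_lines_into_slides_alt lines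
instance (lines : List String) (out : List (List String)) : Decidable (Spec_break_lines_into_slides lines out) := by unfold Spec_break_lines_into_slides; infer_instance

-- ===== CLAIM (what is proved, stated in full; the proofs are below) =====
def Claim_equal_break_lines_into_slides : Prop := ∀ (lines : List String), Dom_break_lines_into_slides lines → Spec_break_lines_into_slides lines (break_lines_into_slides lines)

-- ===== LEMMAS AND PROOFS =====

-- A's loop body, named for the proofs (same term as in the port)
def pvFA (st : List (List String) × List String) (line : String) :
    List (List String) × List String :=
  let line := PySem.Str.rstrip line
  let st := if PySem.Str.startswith line "[slide" then
      ((if st.2 ≠ [] then st.1 ++ [st.2] else st.1), ([] : List String))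
    else st
  (st.1, st.2 ++ [line])

-- B's loop body, named for the proofs (same term as in the port)
def pvGB' (st : List (List String) × List String) (line : String) :
    List (List String) × List String :=
  let stripped := PySem.Str.rstrip line
  let group := st.2 ++ [stripped]
  if PySem.Str.startswith stripped "[slide" then (st.1 ++ [group.reverse], ([] : List String))
  else (st.1, group)

-- cons-style version of B's loop body (B's state with both components reversed)
def pvGB (st : List (List String) × List String) (line : String) :
    List (List String) × List String :=
  let stripped := PySem.Str.rstrip line
  let group := stripped :: st.2
  if PySem.Str.startswith stripped "[slide" then (group :: st.1, ([] : List String))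
  else (st.1, group)

-- B's fold expressed from the right: slides closed so far, open leading group
def pvBF (s : List String) : List (List String) × List String :=
  s.foldr (fun x y => pvGB y x) ([], [])

-- reference recursion: the slides produced from an open segment `cur` followed by `s`
def pvGlue (cur : List String) (s : List String) : List (List String) :=
  match s with
  | [] => if cur = [] then [] else [cur]
  | line :: t =>
    let x := PySem.Str.rstrip line
    if PySem.Str.startswith x "[slide" then
      (if cur = [] then [] else [cur]) ++ pvGlue [x] t
    else pvGlue (cur ++ [x]) t

lemma pvBF_rev (s : List String) :
    s.foldr (fun x y => pvGB' y x) ([], []) = ((pvBF s).1.reverse, (pvBF s).2.reverse) := by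
  induction s with
  | nil => simp [pvBF]
  | cons line t ih =>
    simp only [List.foldr_cons]
    rw [ih]
    have hbf : pvBF (line :: t) = pvGB (pvBF t) line := rfl
    by_cases hm : PySem.Chars.startswith (PySem.Chars.rstrip line.toList)
        ['[', 's', 'l', 'i', 'd', 'e'] = true <;>
      simp [pvGB', hbf, pvGB, hm]

lemma pvA_foldl_glue (s : List String) : ∀ res cur : _,
    (let st := s.foldl pvFA (res, cur);
     if st.2 ≠ [] then st.1 ++ [st.2] else st.1) = res ++ pvGlue cur s := by
  induction s with
  | nil =>
    intro res cur
    by_cases h : cur = [] <;> simp [pvGlue, h]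
  | cons line t ih =>
    intro res cur
    show (let st := t.foldl pvFA (pvFA (res, cur) line);
          if st.2 ≠ [] then st.1 ++ [st.2] else st.1) = res ++ pvGlue cur (line :: t)
    by_cases hm : PySem.Chars.startswith (PySem.Chars.rstrip line.toList)
        ['[', 's', 'l', 'i', 'd', 'e'] = true
    · by_cases hc : cur = []
      · simpa [pvFA, pvGlue, hm, hc] using ih res [PySem.Str.rstrip line]
      · simpa [pvFA, pvGlue, hm, hc, List.append_assoc] using
          ih (res ++ [cur]) [PySem.Str.rstrip line]
    · simpa [pvFA, pvGlue, hm] using ih res (cur ++ [PySem.Str.rstrip line])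

lemma pvGlue_bf (s : List String) : ∀ cur : List String,
    pvGlue cur s =
      (if cur ++ (pvBF s).2 = [] then [] else [cur ++ (pvBF s).2]) ++ (pvBF s).1 := by
  induction s with
  | nil =>
    intro cur
    by_cases h : cur = [] <;> simp [pvGlue, pvBF, h]
  | cons line t ih =>
    intro cur
    have hbf : pvBF (line :: t) = pvGB (pvBF t) line := rfl
    by_cases hm : PySem.Chars.startswith (PySem.Chars.rstrip line.toList)
        ['[', 's', 'l', 'i', 'd', 'e'] = true
    · by_cases hc : cur = [] <;>
        simp [pvGlue, hbf, pvGB, hm, hc, ih [PySem.Str.rstrip line]]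
    · have := ih (cur ++ [PySem.Str.rstrip line])
      simp [pvGlue, hbf, pvGB, hm, List.append_assoc] at this ⊢
      simpa using this

-- ===== VERDICT (by name: the statement is the Claim_ definition above) =====
theorem break_lines_into_slides_spec : Claim_equal_break_lines_into_slides := by
  intro lines _
  show break_lines_into_slides lines = break_lines_into_slides_alt lines
  have hA : break_lines_into_slides lines =
      (let st := lines.foldl pvFA ([], []);
       if st.2 ≠ [] then st.1 ++ [st.2] else st.1) := rfl
  have hB : break_lines_into_slides_alt lines =
      (let st := pvBF lines; if st.2 ≠ [] then st.2 :: st.1 else st.1) := by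
    show (let st := lines.reverse.foldl (fun st line => pvGB' st line) ([], []);
          let slides := if st.2 ≠ [] then st.1 ++ [st.2.reverse] else st.1
          slides.reverse) = _
    rw [List.foldl_reverse, pvBF_rev]
    by_cases h : (pvBF lines).2 = [] <;> simp [h]
  rw [hA, hB, pvA_foldl_glue lines [] [], pvGlue_bf lines []]
  by_cases h : (pvBF lines).2 = [] <;> simp [h]
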